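-- pv_equiv track=rewrite | github.com/forresthopkinsa/now-playing-slack-status | script.py | dualTruncate
-- ===== SOURCE A (Python) =====
-- def dualTruncate(a, b):
--     # Slack max. status length is 100, and we add " - ", so that leaves us 97 characters
--     if len(a) + len(b) > 97:
--         if len(a) >= len(b):
--             a = truncate(a)
--         else:
--             b = truncate(b)
--         # Recurse until we're under 97
--         return dualTruncate(a, b)
--     else:
--         return (a, b)
--
-- def truncate(s):
--     return s[:-4] + "..."
-- ===== SOURCE B (Python) =====
-- def dualTruncate(a, b):
--     # Closed form: the loop always shortens the longer string by 1, so the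
--     # final lengths are determined arithmetically; slice each string once.
--     la, lb = len(a), len(b)
--     if la + lb <= 97:
--         return (a, b)
--     fb = min(lb, max(49, 97 - la))
--     fa = 97 - fb
--     if fa < la:
--         a = a[:fa - 3] + "..."
--     if fb < lb:
--         b = b[:fb - 3] + "..."
--     return (a, b)
-- ===== Notes on version B (the rewrite author's own statement) =====
-- stated objective: faster
-- what changed: Replaces the recursive shorten-the-longer-by-one loop with an arithmetic closed form for the two final lengths (the loop always removes exactly one character from the longer string), then slices each string once.
import Mathlib
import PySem

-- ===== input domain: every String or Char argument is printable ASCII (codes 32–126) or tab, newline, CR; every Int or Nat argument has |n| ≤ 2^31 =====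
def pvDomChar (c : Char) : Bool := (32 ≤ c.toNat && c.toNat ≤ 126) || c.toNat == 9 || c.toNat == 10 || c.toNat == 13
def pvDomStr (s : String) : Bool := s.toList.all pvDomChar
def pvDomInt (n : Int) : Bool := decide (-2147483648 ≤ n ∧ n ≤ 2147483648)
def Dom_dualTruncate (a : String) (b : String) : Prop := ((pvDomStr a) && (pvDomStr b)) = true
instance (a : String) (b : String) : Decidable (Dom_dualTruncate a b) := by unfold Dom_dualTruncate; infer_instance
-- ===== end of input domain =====

-- B replaces A's one-character-at-a-time recursion by an arithmetic closed form
-- for the final lengths plus a single slice per string (objective: faster).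

-- ===== PORT A =====

-- truncate(s) = s[:-4] + "..."
def pvTrunc (s : List Char) : List Char :=
  PySem.List.slice s none (some (-4)) ++ ['.', '.', '.']

-- cited by the port's decreasing_by
theorem pvTrunc_length (s : List Char) : (pvTrunc s).length = s.length - 4 + 3 := by
  rw [pvTrunc, PySem.List.slice_to_neg_ofNat s 4 (by omega)]
  simp

-- the recursion of dualTruncate, on the character lists
def pvDualCore (x : List Char) (y : List Char) : List Char × List Char :=
  if x.length + y.length > 97 then
    if x.length ≥ y.length then
      pvDualCore (pvTrunc x) y
    else
      pvDualCore x (pvTrunc y)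
  else
    (x, y)
termination_by x.length + y.length
decreasing_by
  · rw [pvTrunc_length]; omega
  · rw [pvTrunc_length]; omega

def dualTruncate (a : String) (b : String) : List String :=
  let p := pvDualCore a.toList b.toList
  [String.ofList p.1, String.ofList p.2]

-- ===== PORT B =====

-- closed form of Source B, on the character lists
def pvAltCore (x : List Char) (y : List Char) : List Char × List Char :=
  let la := x.length
  let lb := y.length
  if la + lb ≤ 97 then (x, y)
  else
    let fb := min lb (max 49 (97 - la))
    let fa := 97 - fb
    ((if fa < la then x.take (fa - 3) ++ ['.', '.', '.'] else x),
     (if fb < lb then y.take (fb - 3) ++ ['.', '.', '.'] else y))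

def dualTruncate_alt (a : String) (b : String) : List String :=
  let p := pvAltCore a.toList b.toList
  [String.ofList p.1, String.ofList p.2]

-- ===== PRECONDITION & SPEC =====
def Spec_dualTruncate (a : String) (b : String) (out : List String) : Prop := out = dualTruncate_alt a b
instance (a : String) (b : String) (out : List String) : Decidable (Spec_dualTruncate a b out) := by unfold Spec_dualTruncate; infer_instance

-- ===== CLAIM (what is proved, stated in full; the proofs are below) =====
def Claim_equal_dualTruncate : Prop := ∀ (a : String) (b : String), Dom_dualTruncate a b → Spec_dualTruncate a b (dualTruncate a b)

-- ===== LEMMAS AND PROOFS =====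

theorem pvTrunc_eq (s : List Char) : pvTrunc s = s.take (s.length - 4) ++ ['.', '.', '.'] := by
  rw [pvTrunc, PySem.List.slice_to_neg_ofNat s 4 (by omega)]

theorem take_trunc_take (x : List Char) (k n : Nat) (hk : k ≤ n) (hn : n ≤ x.length) :
    (x.take n ++ ['.', '.', '.']).take k = x.take k := by
  rw [List.take_append_of_le_length (by simp; omega), List.take_take, Nat.min_eq_left hk]

theorem pvAltCore_trunc_left (x y : List Char)
    (hgt : x.length + y.length > 97) (hge : x.length ≥ y.length) :
    pvAltCore (pvTrunc x) y = pvAltCore x y := by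
  have hn : 49 ≤ x.length := by omega
  rw [pvTrunc_eq]
  have hlen : (x.take (x.length - 4) ++ ['.', '.', '.']).length = x.length - 1 := by
    simp; omega
  simp only [pvAltCore, hlen]
  rw [Nat.max_eq_left (show 97 - (x.length - 1) ≤ 49 by omega),
      Nat.max_eq_left (show 97 - x.length ≤ 49 by omega)]
  by_cases hm49 : y.length ≤ 49
  · rw [Nat.min_eq_left hm49]
    by_cases h98 : x.length + y.length = 98
    · rw [if_pos (show x.length - 1 + y.length ≤ 97 by omega),
          if_neg (show ¬ (x.length + y.length ≤ 97) by omega),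
          if_pos (show 97 - y.length < x.length by omega),
          if_neg (show ¬ (y.length < y.length) by omega),
          show 97 - y.length - 3 = x.length - 4 by omega]
    · rw [if_neg (show ¬ (x.length - 1 + y.length ≤ 97) by omega),
          if_neg (show ¬ (x.length + y.length ≤ 97) by omega),
          if_pos (show 97 - y.length < x.length - 1 by omega),
          if_pos (show 97 - y.length < x.length by omega),
          take_trunc_take x _ _ (by omega) (by omega)]
  · rw [Nat.min_eq_right (show 49 ≤ y.length by omega)]
    rw [if_neg (show ¬ (x.length - 1 + y.length ≤ 97) by omega),
        if_neg (show ¬ (x.length + y.length ≤ 97) by omega),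
        if_pos (show 97 - 49 < x.length - 1 by omega),
        if_pos (show 97 - 49 < x.length by omega),
        take_trunc_take x _ _ (by omega) (by omega)]

theorem pvAltCore_trunc_right (x y : List Char)
    (hgt : x.length + y.length > 97) (hlt : ¬ x.length ≥ y.length) :
    pvAltCore x (pvTrunc y) = pvAltCore x y := by
  have hm : 50 ≤ y.length := by omega
  rw [pvTrunc_eq]
  have hlen : (y.take (y.length - 4) ++ ['.', '.', '.']).length = y.length - 1 := by
    simp; omega
  simp only [pvAltCore, hlen]
  by_cases hn48 : x.length ≤ 48
  · rw [Nat.max_eq_right (show 49 ≤ 97 - x.length by omega),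
        Nat.min_eq_right (show 97 - x.length ≤ y.length - 1 by omega),
        Nat.min_eq_right (show 97 - x.length ≤ y.length by omega),
        if_neg (show ¬ (97 - (97 - x.length) < x.length) by omega)]
    by_cases h98 : x.length + y.length = 98
    · rw [if_pos (show x.length + (y.length - 1) ≤ 97 by omega),
          if_neg (show ¬ (x.length + y.length ≤ 97) by omega),
          if_pos (show 97 - x.length < y.length by omega),
          show 97 - x.length - 3 = y.length - 4 by omega]
    · rw [if_neg (show ¬ (x.length + (y.length - 1) ≤ 97) by omega),
          if_neg (show ¬ (x.length + y.length ≤ 97) by omega),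
          if_pos (show 97 - x.length < y.length - 1 by omega),
          if_pos (show 97 - x.length < y.length by omega),
          take_trunc_take y _ _ (by omega) (by omega)]
  · rw [Nat.max_eq_left (show 97 - x.length ≤ 49 by omega),
        Nat.min_eq_right (show 49 ≤ y.length - 1 by omega),
        Nat.min_eq_right (show 49 ≤ y.length by omega),
        if_neg (show ¬ (x.length + (y.length - 1) ≤ 97) by omega),
        if_neg (show ¬ (x.length + y.length ≤ 97) by omega),
        if_pos (show 97 - 49 < x.length by omega)]
    by_cases h50 : y.length = 50
    · rw [if_neg (show ¬ (49 < y.length - 1) by omega),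
          if_pos (show 49 < y.length by omega),
          show 49 - 3 = y.length - 4 by omega]
    · rw [if_pos (show 49 < y.length - 1 by omega),
          if_pos (show 49 < y.length by omega),
          take_trunc_take y _ _ (by omega) (by omega)]

theorem pvDualCore_eq_alt (x y : List Char) : pvDualCore x y = pvAltCore x y := by
  fun_induction pvDualCore x y with
  | case1 x y hgt hge ih =>
      rw [ih, pvAltCore_trunc_left x y hgt hge]
  | case2 x y hgt hge ih =>
      rw [ih, pvAltCore_trunc_right x y hgt hge]
  | case3 x y hle =>
      rw [pvAltCore]
      simp only []
      rw [if_pos (by omega)]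

-- ===== VERDICT (by name: the statement is the Claim_ definition above) =====
theorem dualTruncate_spec : Claim_equal_dualTruncate := by
  intro a b _
  show dualTruncate a b = dualTruncate_alt a b
  rw [dualTruncate, dualTruncate_alt, pvDualCore_eq_alt]
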